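-- pv_equiv track=rewrite | github.com/eliottcassidy2000/math | 04-computation/two_phases_n7.py | compute_alphas
-- ===== SOURCE A (Python) =====
-- def compute_alphas(cycles, max_k=3):
--     nc = len(cycles)
--     vertex_sets = [vs for c, vs in cycles]
--     adj = [[False]*nc for _ in range(nc)]
--     for i in range(nc):
--         for j in range(i+1, nc):
--             if vertex_sets[i] & vertex_sets[j]:
--                 adj[i][j] = True
--                 adj[j][i] = True
--
--     alpha = [0] * (max_k + 1)
--     alpha[0] = 1
--
--     # For large nc, enumerate only up to pairs and triples
--     for i in range(nc):
--         alpha[1] += 1  # Each cycle is an independent set of size 1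
--
--     for i in range(nc):
--         for j in range(i+1, nc):
--             if not adj[i][j]:
--                 alpha[2] += 1
--
--     if max_k >= 3:
--         for i in range(nc):
--             for j in range(i+1, nc):
--                 if adj[i][j]:
--                     continue
--                 for k in range(j+1, nc):
--                     if not adj[i][k] and not adj[j][k]:
--                         alpha[3] += 1
--
--     return alpha
-- ===== SOURCE B (Python) =====
-- def compute_alphas(cycles, max_k=3):
--     # One incremental pass over vertices: for each new vertex j, classify earlier
--     # vertices into neighbours / non-neighbours once; independent pairs ending at j
--     # are len(nonnb), and independent triples ending at j are counted by the
--     # pair-level formula C(s,2) minus the number of edges inside nonnb.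
--     sets = [vs for _, vs in cycles]
--     n = len(sets)
--     nbrs = []   # nbrs[b] = set of earlier neighbours of b
--     a2 = 0
--     a3 = 0
--     for j in range(n):
--         nb = set()
--         nonnb = set()
--         for i in range(j):
--             if sets[i].isdisjoint(sets[j]):
--                 nonnb.add(i)
--             else:
--                 nb.add(i)
--         s = len(nonnb)
--         a2 += s
--         inner = sum(len(nbrs[b] & nonnb) for b in nonnb)
--         a3 += s * (s - 1) // 2 - inner
--         nbrs.append(nb)
--     alpha = [1, n, a2, a3] + [0] * (max_k - 3)
--     return alpha[:max_k + 1]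
-- ===== Notes on version B (the rewrite author's own statement) =====
-- stated objective: faster
-- what changed: Instead of building an n-by-n adjacency matrix and enumerating all pairs and triples with an O(n^3) triple loop, B makes one incremental pass: for each vertex j it classifies earlier vertices into neighbours/non-neighbours once, adds len(nonnb) to alpha[2], and counts independent triples ending at j by the pair-level identity C(s,2) minus the number of edges inside the non-neighbour set (computed with set intersections against stored neighbour sets).
import Mathlib
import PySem

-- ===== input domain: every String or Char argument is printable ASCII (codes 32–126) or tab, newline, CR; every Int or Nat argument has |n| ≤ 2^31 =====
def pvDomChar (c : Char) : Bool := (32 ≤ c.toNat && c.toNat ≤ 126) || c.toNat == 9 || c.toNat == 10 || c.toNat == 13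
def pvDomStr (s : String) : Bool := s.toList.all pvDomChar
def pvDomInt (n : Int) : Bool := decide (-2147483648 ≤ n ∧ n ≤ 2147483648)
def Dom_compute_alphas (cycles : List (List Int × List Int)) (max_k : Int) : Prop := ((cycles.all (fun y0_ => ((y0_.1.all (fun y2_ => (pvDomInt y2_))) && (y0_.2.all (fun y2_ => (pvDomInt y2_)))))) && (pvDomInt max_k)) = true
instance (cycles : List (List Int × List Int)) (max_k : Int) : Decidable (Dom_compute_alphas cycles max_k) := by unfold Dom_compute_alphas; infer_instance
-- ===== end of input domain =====

-- B replaces A's adjacency matrix plus O(n^3) triple loop by one incremental pass that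
-- counts independent triples ending at each vertex with the pair-level formula
-- C(s,2) - (edges inside the non-neighbour set); measurably faster on sparse overlap graphs.

-- ===== PORT A =====

-- truthiness of `vertex_sets[i] & vertex_sets[j]` (nonempty set intersection)
def pvOverlap (a b : List Int) : Bool := !(PySem.Set.inter (PySem.Set.ofList a) b).isEmpty

-- xs[i] = v for the nonnegative, in-range indices used by both ports
def pvSetI {α : Type} (xs : List α) (i : Int) (v : α) : List α := xs.set i.toNat v

-- alpha[m] += 1 (Python raises IndexError when m is out of range; such inputs are outside Pre_)
def pvIncAt (a : List Int) (m : Nat) : List Int := a.set m (a.getD m 0 + 1)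

-- adj[i][j]
def pvAdjAt (M : List (List Bool)) (i j : Int) : Bool :=
  PySem.List.pyGetD (PySem.List.pyGetD M i []) j false

-- loop body of the adjacency-matrix construction: adj[i][j] = True; adj[j][i] = True
def pvAdjStep (vertex_sets : List (List Int)) (M : List (List Bool)) (i j : Int) : List (List Bool) :=
  if pvOverlap (PySem.List.pyGetD vertex_sets i []) (PySem.List.pyGetD vertex_sets j []) then
    let M1 := pvSetI M i (pvSetI (PySem.List.pyGetD M i []) j true)
    pvSetI M1 j (pvSetI (PySem.List.pyGetD M1 j []) i true)
  else M

def compute_alphas (cycles : List (List Int × List Int)) (max_k : Int) : List Int :=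
  let nc : Int := (cycles.length : Int)
  let vertex_sets : List (List Int) := cycles.map (fun c => c.2)
  let adj := (PySem.List.pyRange 0 nc).foldl (fun M i =>
      (PySem.List.pyRange (i + 1) nc).foldl (fun M j => pvAdjStep vertex_sets M i j) M)
    (List.replicate cycles.length (List.replicate cycles.length false))
  let alpha0 : List Int := (List.replicate (max_k + 1).toNat 0).set 0 1
  let alpha1 := (PySem.List.pyRange 0 nc).foldl (fun a _ => pvIncAt a 1) alpha0
  let alpha2 := (PySem.List.pyRange 0 nc).foldl (fun a i =>
      (PySem.List.pyRange (i + 1) nc).foldl (fun a j =>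
        if !(pvAdjAt adj i j) then pvIncAt a 2 else a) a) alpha1
  let alpha3 := if max_k ≥ 3 then
      (PySem.List.pyRange 0 nc).foldl (fun a i =>
        (PySem.List.pyRange (i + 1) nc).foldl (fun a j =>
          if pvAdjAt adj i j then a else
            (PySem.List.pyRange (j + 1) nc).foldl (fun a k =>
              if !(pvAdjAt adj i k) && !(pvAdjAt adj j k) then pvIncAt a 3 else a) a) a) alpha2
    else alpha2
  alpha3

-- ===== PORT B =====

-- per-vertex step of B's single pass: classify earlier vertices, update a2 and a3
def pvAltStep (sets : List (List Int)) (st : List (PySem.Set Int) × Int × Int) (j : Int) :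
    List (PySem.Set Int) × Int × Int :=
  let pr := (PySem.List.pyRange 0 j).foldl
    (fun (pr : PySem.Set Int × PySem.Set Int) i =>
      if pvOverlap (PySem.List.pyGetD sets i []) (PySem.List.pyGetD sets j []) then
        (PySem.Set.add pr.1 i, pr.2)
      else
        (pr.1, PySem.Set.add pr.2 i)) (PySem.Set.empty, PySem.Set.empty)
  let nonnb := pr.2
  let s : Int := PySem.Set.len nonnb
  let inner : Int := (nonnb.map (fun b =>
      PySem.Set.len (PySem.Set.inter (PySem.List.pyGetD st.1 b PySem.Set.empty) nonnb))).sum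
  (st.1 ++ [pr.1], st.2.1 + s, st.2.2 + (PySem.Int.floordiv (s * (s - 1)) 2 - inner))

def compute_alphas_alt (cycles : List (List Int × List Int)) (max_k : Int) : List Int :=
  let sets : List (List Int) := cycles.map (fun c => c.2)
  let n : Int := (sets.length : Int)
  let st := (PySem.List.pyRange 0 n).foldl (pvAltStep sets) ([], 0, 0)
  let alpha : List Int := [1, n, st.2.1, st.2.2] ++ List.replicate (max_k - 3).toNat 0
  PySem.List.slice alpha none (some (max_k + 1))

-- ===== PRECONDITION & SPEC =====

-- Pre_ holds exactly where the Python A returns normally; it excludes only inputs on which A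
-- raises IndexError into the alpha list: max_k < 0; max_k = 0 with a nonempty cycle list;
-- max_k = 1 with at least two cycles of which some pair of vertex sets is disjoint.
def Pre_compute_alphas (cycles : List (List Int × List Int)) (max_k : Int) : Prop :=
  2 ≤ max_k
  ∨ (max_k = 1 ∧ (cycles.length ≤ 1 ∨ List.Pairwise (fun p q => ∃ x ∈ p.2, x ∈ q.2) cycles))
  ∨ (max_k = 0 ∧ cycles = [])

instance (cycles : List (List Int × List Int)) (max_k : Int) : Decidable (Pre_compute_alphas cycles max_k) := by
  unfold Pre_compute_alphas; infer_instance

def pvWitness_compute_alphas : (List (List Int × List Int)) × Int :=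
  ([([1], [1, 2]), ([2], [2, 3]), ([0], [4])], 3)

def Spec_compute_alphas (cycles : List (List Int × List Int)) (max_k : Int) (out : List Int) : Prop := out = compute_alphas_alt cycles max_k
instance (cycles : List (List Int × List Int)) (max_k : Int) (out : List Int) : Decidable (Spec_compute_alphas cycles max_k out) := by unfold Spec_compute_alphas; infer_instance

-- ===== CLAIM (what is proved, stated in full; the proofs are below) =====
def Claim_equal_compute_alphas : Prop := ∀ (cycles : List (List Int × List Int)) (max_k : Int), Dom_compute_alphas cycles max_k → Pre_compute_alphas cycles max_k → Spec_compute_alphas cycles max_k (compute_alphas cycles max_k)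

-- ===== LEMMAS AND PROOFS =====

-- ---- spec layer, loop characterisations and the equivalence proof ----


def pvCast (l : List Nat) : List Int := List.map (fun (a : Nat) => (a : Int)) l

lemma pvCast_mem (l : List Nat) (a : Nat) : ((a : Int) ∈ pvCast l) ↔ a ∈ l := by
  unfold pvCast
  constructor
  · intro h
    obtain ⟨x, hx, hxx⟩ := List.mem_map.mp h
    have : x = a := by exact_mod_cast hxx
    rwa [this] at hx
  · intro h
    exact List.mem_map.mpr ⟨a, h, rfl⟩

lemma pvSumRange {M : Type} [AddCommMonoid M] (n : Nat) (f : Nat → M) :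
    ((List.range n).map f).sum = ∑ i ∈ Finset.range n, f i := by
  induction n with
  | zero => simp
  | succ m ih => rw [List.range_succ, Finset.sum_range_succ]; simp [ih]

lemma pvCountPRange (n : Nat) (p : Nat → Bool) :
    (List.range n).countP p = ∑ i ∈ Finset.range n, (if p i then 1 else 0) := by
  induction n with
  | zero => simp
  | succ m ih =>
      rw [List.range_succ, Finset.sum_range_succ, List.countP_append, ih]
      simp [List.countP_cons]

lemma pvCountPRangeLt (p : Nat → Bool) {b n : Nat} (h : b ≤ n) :
    (List.range n).countP (fun a => decide (a < b) && p a) = (List.range b).countP p := by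
  induction n, h using Nat.le_induction with
  | base =>
      apply List.countP_congr
      intro a ha
      simp [List.mem_range.mp ha]
  | succ m hm ih =>
      rw [List.range_succ, List.countP_append, ih]
      simp [Nat.not_lt.mpr hm]

lemma pvPyRangeNil {a b : Int} (h : b ≤ a) : PySem.List.pyRange a b = [] := by
  simp only [PySem.List.pyRange]
  norm_num
  intro h'
  omega

lemma pvSumPyRange (a b : Nat) (g : Int → Int) :
    ((PySem.List.pyRange ↑a ↑b).map g).sum = ∑ k ∈ Finset.Ico a b, g ↑k := by
  by_cases hab : b ≤ a
  · rw [pvPyRangeNil (by exact_mod_cast hab), Finset.Ico_eq_empty (by omega)]; simp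
  · rw [not_le] at hab
    have hk : b - a ≤ b - a := le_refl _
    -- fuel induction
    suffices H : ∀ (k a : Nat), b - a ≤ k → ((PySem.List.pyRange ↑a ↑b).map g).sum = ∑ k ∈ Finset.Ico a b, g ↑k from
      H (b - a) a le_rfl
    intro k
    induction k with
    | zero =>
        intro a ha
        rw [pvPyRangeNil (by omega), Finset.Ico_eq_empty (by omega)]; simp
    | succ m ih =>
        intro a ha
        by_cases h2 : b ≤ a
        · rw [pvPyRangeNil (by exact_mod_cast h2), Finset.Ico_eq_empty (by omega)]; simp
        · rw [not_le] at h2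
          rw [PySem.List.pyRange_one_cons (by exact_mod_cast h2), List.map_cons, List.sum_cons,
            Finset.sum_eq_sum_Ico_succ_bot h2]
          have : (↑a + 1 : Int) = ↑(a + 1) := by push_cast; ring
          rw [this, ih (a + 1) (by omega)]

lemma pvCastSum (S : List Nat) (g : Nat → Nat) :
    (List.map (fun b => ((g b : Nat) : Int)) S).sum = ↑((S.map g).sum) := by
  induction S with
  | nil => simp
  | cons x t ih => simp [ih]

lemma pvSumMapFilter {M : Type} [AddCommMonoid M] (l : List Nat) (q : Nat → Bool) (f : Nat → M) :
    ((l.filter q).map f).sum = (l.map (fun x => if q x then f x else 0)).sum := by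
  induction l with
  | nil => simp
  | cons x t ih =>
      by_cases h : q x <;> simp [h, ih]

lemma pvIteMul (x y : Bool) :
    (if x then (1 : Int) else 0) * (if y then 1 else 0) = if x && y then 1 else 0 := by
  cases x <;> cases y <;> simp

lemma pvCountPSplit (l : List Nat) (p q : Nat → Bool) :
    l.countP p = l.countP (fun a => p a && q a) + l.countP (fun a => p a && !q a) := by
  induction l with
  | nil => simp
  | cons x t ih =>
      by_cases hp : p x <;> by_cases hq : q x <;>
        simp [hp, hq, ih] <;> omega

lemma pvSumMapOneAdd (T : List Nat) (f : Nat → Nat) :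
    (T.map (fun b => 1 + f b)).sum = T.length + (T.map f).sum := by
  induction T with
  | nil => simp
  | cons y U ihu => simp [ihu]; omega

lemma pvBelowSum (S : List Nat) (hS : S.Pairwise (· < ·)) :
    (S.map (fun b => S.countP (fun a => decide (a < b)))).sum = S.length * (S.length - 1) / 2 := by
  induction S with
  | nil => simp
  | cons x T ih =>
      rcases List.pairwise_cons.mp hS with ⟨hx, hT⟩
      have h0 : (x :: T).countP (fun a => decide (a < x)) = 0 := by
        rw [List.countP_eq_zero]
        intro a ha
        rcases List.mem_cons.mp ha with rfl | ha'
        · simp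
        · have := hx a ha'
          simp
          omega
      have hb : ∀ b ∈ T, (x :: T).countP (fun a => decide (a < b)) = 1 + T.countP (fun a => decide (a < b)) := by
        intro b hb
        rw [List.countP_cons]
        simp [hx b hb]
        omega
      rw [List.map_cons, List.sum_cons, h0]
      have : (T.map (fun b => (x :: T).countP (fun a => decide (a < b)))).sum
           = (T.map (fun b => 1 + T.countP (fun a => decide (a < b)))).sum := by
        apply congrArg
        exact List.map_congr_left hb
      rw [this, pvSumMapOneAdd, ih hT]
      have h2 : T.length + 1 - 1 = T.length := rfl
      simp only [List.length_cons, h2]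
      have h3 := Nat.triangle_succ T.length
      simp only [h2] at h3
      omega


lemma pvFloordivTri (L : Nat) :
    PySem.Int.floordiv ((L : Int) * ((L : Int) - 1)) 2 = ↑(L * (L - 1) / 2) := by
  cases L with
  | zero => decide
  | succ l =>
      have h1 : ((l + 1 : Nat) : Int) * (((l + 1 : Nat) : Int) - 1) = ↑((l + 1) * l) := by
        push_cast; ring
      have h2 : (l + 1) * (l + 1 - 1) = (l + 1) * l := rfl
      rw [h1, h2, PySem.Int.floordiv_eq_ediv_of_pos (by norm_num), Int.natCast_ediv]
      norm_num

def pvIncBy (a : List Int) (m : Nat) (c : Int) : List Int := a.set m (a.getD m 0 + c)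

lemma pvIncBy_zero (a : List Int) (m : Nat) : pvIncBy a m 0 = a := by
  unfold pvIncBy
  rw [add_zero]
  by_cases h : m < a.length
  · rw [List.getD_eq_getElem a 0 h]; exact List.set_getElem_self h
  · exact List.set_eq_of_length_le (by omega)

lemma pvIncBy_incBy (a : List Int) (m : Nat) (c d : Int) :
    pvIncBy (pvIncBy a m c) m d = pvIncBy a m (c + d) := by
  unfold pvIncBy
  by_cases h : m < a.length
  · have hl : m < (a.set m (a.getD m 0 + c)).length := by simpa using h
    rw [List.getD_eq_getElem _ 0 hl, List.getElem_set_self, List.set_set]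
    rw [List.getD_eq_getElem a 0 h]
    ring_nf
  · rw [List.set_eq_of_length_le (l := a) (by omega), List.set_eq_of_length_le (by omega),
      List.set_eq_of_length_le (by omega)]

lemma pvFoldIncBy {α : Type} (l : List α) (g : α → Int) (m : Nat) (a : List Int) :
    l.foldl (fun acc x => pvIncBy acc m (g x)) a = pvIncBy a m ((l.map g).sum) := by
  induction l generalizing a with
  | nil => simp [pvIncBy_zero]
  | cons x t ih => simp [ih, pvIncBy_incBy]

def pvRb (vs : List (List Int)) (i j : Nat) : Bool := pvOverlap (vs.getD i []) (vs.getD j [])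
def pvSjL (vs : List (List Int)) (j : Nat) : List Nat :=
  (List.range j).filter (fun i => !(pvRb vs i j))
def pvNbL (vs : List (List Int)) (j : Nat) : List Nat :=
  (List.range j).filter (fun i => pvRb vs i j)
def pvTripAt (vs : List (List Int)) (j : Nat) : Nat :=
  ((pvSjL vs j).map (fun b => (pvSjL vs j).countP (fun a => decide (a < b) && !(pvRb vs a b)))).sum
def pvPairCnt (vs : List (List Int)) (n : Nat) : Nat :=
  ((List.range n).map (fun j => (pvSjL vs j).length)).sum
def pvTripCnt (vs : List (List Int)) (n : Nat) : Nat :=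
  ((List.range n).map (pvTripAt vs)).sum

-- the common normal form both ports are reduced to
def pvAns (N P T : Nat) (max_k : Int) : List Int :=
  PySem.List.slice ([1, (N : Int), (P : Int), (T : Int)] ++ List.replicate (max_k - 3).toNat 0)
    none (some (max_k + 1))

lemma pvSumMapAdd (T : List Nat) (f g : Nat → Nat) :
    (T.map (fun b => f b + g b)).sum = (T.map f).sum + (T.map g).sum := by
  induction T with
  | nil => simp
  | cons y U ih => simp [ih]; omega

lemma pvAltInner (vs : List (List Int)) (j : Nat) :
    (PySem.List.pyRange 0 ↑j).foldl
      (fun (pr : PySem.Set Int × PySem.Set Int) i =>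
        if pvOverlap (PySem.List.pyGetD vs i []) (PySem.List.pyGetD vs ↑j []) then
          (PySem.Set.add pr.1 i, pr.2)
        else (pr.1, PySem.Set.add pr.2 i)) (PySem.Set.empty, PySem.Set.empty)
    = (pvCast (pvNbL vs j), pvCast (pvSjL vs j)) := by
  rw [PySem.List.pyRange_zero_natCast, List.foldl_map]
  have key : ∀ m : Nat,
      (List.range m).foldl
        (fun (pr : PySem.Set Int × PySem.Set Int) (k : Nat) =>
          if pvOverlap (PySem.List.pyGetD vs ↑k []) (PySem.List.pyGetD vs ↑j []) then
            (PySem.Set.add pr.1 ↑k, pr.2)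
          else (pr.1, PySem.Set.add pr.2 ↑k)) (PySem.Set.empty, PySem.Set.empty)
      = (pvCast ((List.range m).filter (fun i => pvRb vs i j)),
         pvCast ((List.range m).filter (fun i => !(pvRb vs i j)))) := by
    intro m
    induction m with
    | zero => simp [PySem.Set.empty, pvCast]
    | succ t ih =>
        rw [List.range_succ, List.foldl_append, ih]
        have hcond : pvOverlap (PySem.List.pyGetD vs ↑t []) (PySem.List.pyGetD vs ↑j []) = pvRb vs t j := by
          rw [PySem.List.pyGetD_natCast, PySem.List.pyGetD_natCast]; rfl
        have hnotmem : ∀ (l : List Nat), (∀ x ∈ l, x < t) → (↑t : Int) ∉ pvCast l := by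
          intro l hl hmem
          have := hl t ((pvCast_mem l t).mp hmem)
          omega
        simp only [List.foldl_cons, List.foldl_nil, hcond]
        have hbd : ∀ (p : Nat → Bool), ∀ x ∈ (List.range t).filter p, x < t := by
          intro p x hx
          exact List.mem_range.mp (List.mem_filter.mp hx).1
        by_cases h : pvRb vs t j
        · rw [if_pos h]
          rw [PySem.Set.add_of_not_mem (hnotmem ((List.range t).filter (fun i => pvRb vs i j)) (hbd _))]
          simp [pvCast, List.filter_append, h]
        · rw [if_neg h]
          rw [PySem.Set.add_of_not_mem (hnotmem ((List.range t).filter (fun i => !(pvRb vs i j))) (hbd _))]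
          simp [pvCast, List.filter_append, h]
  exact key j

lemma pvSjL_pairwise (vs : List (List Int)) (t : Nat) : (pvSjL vs t).Pairwise (· < ·) :=
  List.Pairwise.filter _ (List.pairwise_lt_range)

lemma pvSjL_lt {vs : List (List Int)} {t b : Nat} (hb : b ∈ pvSjL vs t) : b < t :=
  List.mem_range.mp (List.mem_filter.mp hb).1

lemma pvInnerCount (vs : List (List Int)) (t : Nat) {b : Nat} (hb : b ∈ pvSjL vs t) :
    (pvNbL vs b).countP (fun a => (pvSjL vs t).contains a)
      = (pvSjL vs t).countP (fun a => decide (a < b) && pvRb vs a b) := by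
  have hbt : b < t := pvSjL_lt hb
  unfold pvNbL pvSjL
  rw [List.countP_filter, List.countP_filter]
  have hR : (List.range t).countP
      (fun a => (decide (a < b) && pvRb vs a b) && !(pvRb vs a t))
      = (List.range b).countP (fun a => pvRb vs a b && !(pvRb vs a t)) := by
    rw [← pvCountPRangeLt (fun a => pvRb vs a b && !(pvRb vs a t)) (le_of_lt hbt)]
    apply List.countP_congr
    intro a _
    cases decide (a < b) <;> cases pvRb vs a b <;> cases pvRb vs a t <;> rfl
  rw [hR]
  apply List.countP_congr
  intro a ha
  have halt : a < b := List.mem_range.mp ha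
  have hcont : (pvSjL vs t).contains a = !(pvRb vs a t) := by
    by_cases hmem : a ∈ pvSjL vs t
    · have := (List.mem_filter.mp hmem).2
      simp [hmem, this]
    · have : ¬ (!(pvRb vs a t)) = true := by
        intro hnot
        exact hmem (List.mem_filter.mpr ⟨List.mem_range.mpr (by omega), hnot⟩)
      simp [hmem]
      simpa using this
  simp only [pvSjL] at hcont
  rw [hcont, Bool.and_comm]

lemma pvStar (vs : List (List Int)) (t : Nat) :
    (pvSjL vs t).length * ((pvSjL vs t).length - 1) / 2
      = pvTripAt vs t
        + ((pvSjL vs t).map (fun b => (pvNbL vs b).countP (fun a => (pvSjL vs t).contains a))).sum := by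
  rw [← pvBelowSum _ (pvSjL_pairwise vs t)]
  have hsplit : ∀ b, (pvSjL vs t).countP (fun a => decide (a < b))
      = (pvSjL vs t).countP (fun a => decide (a < b) && !(pvRb vs a b))
        + (pvSjL vs t).countP (fun a => decide (a < b) && pvRb vs a b) := by
    intro b
    rw [pvCountPSplit (pvSjL vs t) (fun a => decide (a < b)) (fun a => !(pvRb vs a b))]
    congr 1
    apply List.countP_congr
    intro a _
    cases decide (a < b) <;> cases pvRb vs a b <;> rfl
  calc ((pvSjL vs t).map (fun b => (pvSjL vs t).countP (fun a => decide (a < b)))).sum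
      = ((pvSjL vs t).map (fun b =>
          (pvSjL vs t).countP (fun a => decide (a < b) && !(pvRb vs a b))
          + (pvSjL vs t).countP (fun a => decide (a < b) && pvRb vs a b))).sum := by
        exact congrArg _ (List.map_congr_left (fun b _ => hsplit b))
    _ = pvTripAt vs t
        + ((pvSjL vs t).map (fun b => (pvSjL vs t).countP (fun a => decide (a < b) && pvRb vs a b))).sum := by
        rw [pvSumMapAdd]; rfl
    _ = _ := by
        congr 1
        exact (congrArg _ (List.map_congr_left (fun b hb => (pvInnerCount vs t hb).symm)))

lemma pvPairCnt_succ (vs : List (List Int)) (t : Nat) :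
    pvPairCnt vs (t + 1) = pvPairCnt vs t + (pvSjL vs t).length := by
  unfold pvPairCnt
  rw [List.range_succ, List.map_append, List.sum_append]
  simp

lemma pvTripCnt_succ (vs : List (List Int)) (t : Nat) :
    pvTripCnt vs (t + 1) = pvTripCnt vs t + pvTripAt vs t := by
  unfold pvTripCnt
  rw [List.range_succ, List.map_append, List.sum_append]
  simp

lemma pvAltOuter (vs : List (List Int)) (m : Nat) :
    (List.range m).foldl (fun st (j : Nat) => pvAltStep vs st ↑j) ([], 0, 0)
      = ((List.range m).map (fun j => pvCast (pvNbL vs j)),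
         (↑(pvPairCnt vs m) : Int), (↑(pvTripCnt vs m) : Int)) := by
  induction m with
  | zero => simp [pvPairCnt, pvTripCnt]
  | succ t ih =>
      rw [List.range_succ, List.foldl_append, ih]
      simp only [List.foldl_cons, List.foldl_nil]
      unfold pvAltStep
      rw [pvAltInner]
      simp only []
      -- components
      have hlen : PySem.Set.len (pvCast (pvSjL vs t)) = ((pvSjL vs t).length : Int) := by
        simp [PySem.Set.len, pvCast]
      have hinner : ((pvCast (pvSjL vs t)).map (fun b =>
          PySem.Set.len (PySem.Set.inter
            (PySem.List.pyGetD ((List.range t).map (fun j => pvCast (pvNbL vs j))) b PySem.Set.empty)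
            (pvCast (pvSjL vs t))))).sum
          = ↑(((pvSjL vs t).map (fun b => (pvNbL vs b).countP (fun a => (pvSjL vs t).contains a))).sum) := by
        unfold pvCast
        rw [List.map_map]
        rw [List.map_congr_left (l := pvSjL vs t)
          (f := _) (g := fun b => (((pvNbL vs b).countP (fun a => (pvSjL vs t).contains a) : Nat) : Int)) ?_]
        · exact pvCastSum _ _
        · intro b hb
          have hbt : b < t := pvSjL_lt hb
          simp only [Function.comp]
          rw [PySem.List.pyGetD_natCast, PySem.List.getD_map_range _ _ _ _ hbt]
          simp only [PySem.Set.inter, PySem.Set.len]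
          rw [List.filter_map, List.length_map, ← List.countP_eq_length_filter]
          congr 2
          funext a
          simp only [Function.comp]
          simp
      rw [hlen, hinner]
      refine Prod.ext ?_ (Prod.ext ?_ ?_)
      · show _ ++ [pvCast (pvNbL vs t)] = (List.map (fun j => pvCast (pvNbL vs j)) (List.range t ++ [t]), (↑(pvPairCnt vs (t+1)) : Int), (↑(pvTripCnt vs (t+1)) : Int)).1
        rw [List.map_append]
        rfl
      · show (↑(pvPairCnt vs t) : Int) + ↑(pvSjL vs t).length = ↑(pvPairCnt vs (t+1))
        rw [pvPairCnt_succ]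
        push_cast
        ring
      · show (↑(pvTripCnt vs t) : Int) +
            (PySem.Int.floordiv ((↑(pvSjL vs t).length : Int) * (↑(pvSjL vs t).length - 1)) 2 - _)
            = (↑(pvTripCnt vs (t+1)) : Int)
        rw [pvFloordivTri, pvStar vs t, pvTripCnt_succ]
        push_cast
        ring

lemma pvB_eq (cycles : List (List Int × List Int)) (max_k : Int) :
    compute_alphas_alt cycles max_k =
      pvAns cycles.length (pvPairCnt (cycles.map (fun c => c.2)) cycles.length)
        (pvTripCnt (cycles.map (fun c => c.2)) cycles.length) max_k := by
  unfold compute_alphas_alt pvAns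
  dsimp only
  have hlen : (cycles.map (fun c => c.2)).length = cycles.length := List.length_map _
  rw [hlen]
  rw [PySem.List.pyRange_zero_natCast, List.foldl_map]
  rw [show (fun (st : List (PySem.Set Int) × Int × Int) (k : Nat) =>
        pvAltStep (cycles.map (fun c => c.2)) st ↑k)
      = (fun st (j : Nat) => pvAltStep (cycles.map (fun c => c.2)) st ↑j) from rfl]
  rw [pvAltOuter]

def pvEnt (M : List (List Bool)) (p q : Nat) : Bool := (M.getD p []).getD q false
def pvShape (M : List (List Bool)) (n : Nat) : Prop := M.length = n ∧ ∀ r ∈ M, r.length = n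
def pvInv (vs : List (List Int)) (n : Nat) (M : List (List Bool)) (i j0 : Nat) : Prop :=
  ∀ p q : Nat, (pvEnt M p q = true) ↔
    (p ≠ q ∧ max p q < n ∧ (min p q < i ∨ (min p q = i ∧ max p q < j0)) ∧ pvRb vs (min p q) (max p q) = true)

lemma pvGetD_eq {α : Type} (l : List α) (n : Nat) (d : α) : l.getD n d = (l[n]?).getD d :=
  List.getD_eq_getElem?_getD

-- entry view of one `adj[p][q] = v` row update
lemma pvEnt_setRow (M : List (List Bool)) (n : Nat) (hM : pvShape M n) (p q : Nat)
    (hp : p < n) (hq : q < n) (v : Bool) (p' q' : Nat) :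
    pvEnt (pvSetI M ↑p (pvSetI (PySem.List.pyGetD M ↑p []) ↑q v)) p' q'
      = if p' = p ∧ q' = q then v else pvEnt M p' q' := by
  unfold pvSetI pvEnt
  rw [PySem.List.pyGetD_natCast, Int.toNat_natCast, Int.toNat_natCast]
  have h1 := hM.1
  have hplen : p < M.length := by omega
  have hrow : (M.getD p []).length = n := by
    rw [pvGetD_eq, List.getElem?_eq_getElem hplen]
    exact hM.2 _ (List.getElem_mem hplen)
  by_cases hp' : p' = p
  · subst hp'
    rw [pvGetD_eq (M.set p' _), List.getElem?_set, if_pos rfl, if_pos hplen]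
    simp only [Option.getD_some]
    by_cases hq' : q' = q
    · subst hq'
      rw [pvGetD_eq, List.getElem?_set, if_pos rfl, if_pos (by omega)]
      simp
    · rw [pvGetD_eq, List.getElem?_set, if_neg (fun h => hq' h.symm)]
      rw [if_neg (fun h => hq' h.2)]
      simp
  · rw [pvGetD_eq (M.set p _), List.getElem?_set, if_neg (fun h => hp' h.symm)]
    rw [if_neg (fun h => hp' h.1)]
    simp

lemma pvShape_setRow (M : List (List Bool)) (n : Nat) (hM : pvShape M n) (p q : Nat)
    (hp : p < n) (v : Bool) :
    pvShape (pvSetI M ↑p (pvSetI (PySem.List.pyGetD M ↑p []) ↑q v)) n := by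
  unfold pvSetI
  constructor
  · simpa using hM.1
  · intro r hr
    rcases List.mem_or_eq_of_mem_set hr with hr' | rfl
    · exact hM.2 r hr'
    · rw [List.length_set]
      rw [PySem.List.pyGetD_natCast]
      have h1 := hM.1
      have hplen : p < M.length := by omega
      rw [pvGetD_eq, List.getElem?_eq_getElem hplen]
      exact hM.2 _ (List.getElem_mem hplen)

lemma pvInvStep (vs : List (List Int)) (n : Nat) (M : List (List Bool)) (i j : Nat)
    (hij : i < j) (hj : j < n) (hM : pvShape M n) (hInv : pvInv vs n M i j) :
    pvShape (pvAdjStep vs M ↑i ↑j) n ∧ pvInv vs n (pvAdjStep vs M ↑i ↑j) i (j + 1) := by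
  unfold pvAdjStep
  have hcond : pvOverlap (PySem.List.pyGetD vs ↑i []) (PySem.List.pyGetD vs ↑j []) = pvRb vs i j := by
    rw [PySem.List.pyGetD_natCast, PySem.List.pyGetD_natCast]; rfl
  simp only [hcond]
  by_cases h : pvRb vs i j = true
  · rw [if_pos h]
    have hM1 := pvShape_setRow M n hM i j (by omega) true
    have hM2 := pvShape_setRow _ n hM1 j i hj true
    refine ⟨hM2, ?_⟩
    intro p q
    rw [pvEnt_setRow _ n hM1 j i hj (by omega)]
    rw [pvEnt_setRow M n hM i j (by omega) hj]
    by_cases hji : p = j ∧ q = i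
    · rw [if_pos hji]
      obtain ⟨hpj, hqi⟩ := hji
      simp only [true_iff]
      refine ⟨by omega, by omega, by omega, ?_⟩
      rw [show min p q = i by omega, show max p q = j by omega]
      exact h
    · rw [if_neg hji]
      by_cases hijc : p = i ∧ q = j
      · rw [if_pos hijc]
        obtain ⟨hpi, hqj⟩ := hijc
        simp only [true_iff]
        refine ⟨by omega, by omega, by omega, ?_⟩
        rw [show min p q = i by omega, show max p q = j by omega]
        exact h
      · rw [if_neg hijc]
        rw [hInv p q]
        constructor
        · rintro ⟨h1, h2, h3, h4⟩
          exact ⟨h1, h2, by omega, h4⟩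
        · rintro ⟨h1, h2, h3, h4⟩
          refine ⟨h1, h2, ?_, h4⟩
          by_cases hm : min p q = i ∧ max p q = j
          · exfalso
            rcases Nat.lt_or_ge p q with hpq | hpq
            · exact hijc ⟨by omega, by omega⟩
            · exact hji ⟨by omega, by omega⟩
          · omega
  · rw [if_neg h]
    refine ⟨hM, ?_⟩
    intro p q
    rw [hInv p q]
    constructor
    · rintro ⟨h1, h2, h3, h4⟩
      exact ⟨h1, h2, by omega, h4⟩
    · rintro ⟨h1, h2, h3, h4⟩
      refine ⟨h1, h2, ?_, h4⟩
      by_cases hm : min p q = i ∧ max p q = j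
      · exfalso
        rw [hm.1, hm.2] at h4
        exact h h4
      · omega

lemma pvInvInnerAux (vs : List (List Int)) (n i : Nat) :
    ∀ (k j0 : Nat) (M : List (List Bool)), i < j0 → pvShape M n → pvInv vs n M i j0 → n ≤ j0 + k →
      pvShape ((PySem.List.pyRange ↑j0 ↑n).foldl (fun M j => pvAdjStep vs M ↑i j) M) n ∧
      pvInv vs n ((PySem.List.pyRange ↑j0 ↑n).foldl (fun M j => pvAdjStep vs M ↑i j) M) i n := by
  intro k
  induction k with
  | zero =>
      intro j0 M hij0 hM hInv hk
      rw [pvPyRangeNil (by exact_mod_cast hk)]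
      simp only [List.foldl_nil]
      refine ⟨hM, ?_⟩
      intro p q
      rw [hInv p q]
      constructor
      · rintro ⟨h1, h2, h3, h4⟩
        exact ⟨h1, h2, by omega, h4⟩
      · rintro ⟨h1, h2, h3, h4⟩
        exact ⟨h1, h2, by omega, h4⟩
  | succ m ih =>
      intro j0 M hij0 hM hInv hk
      by_cases hj0 : n ≤ j0
      · rw [pvPyRangeNil (by exact_mod_cast hj0)]
        simp only [List.foldl_nil]
        refine ⟨hM, ?_⟩
        intro p q
        rw [hInv p q]
        constructor
        · rintro ⟨h1, h2, h3, h4⟩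
          exact ⟨h1, h2, by omega, h4⟩
        · rintro ⟨h1, h2, h3, h4⟩
          exact ⟨h1, h2, by omega, h4⟩
      · rw [not_le] at hj0
        rw [PySem.List.pyRange_one_cons (by exact_mod_cast hj0)]
        simp only [List.foldl_cons]
        obtain ⟨hM', hInv'⟩ := pvInvStep vs n M i j0 hij0 hj0 hM hInv
        have hcast : ((j0 : Int) + 1) = ((j0 + 1 : Nat) : Int) := by push_cast; ring
        rw [hcast]
        exact ih (j0 + 1) _ (by omega) hM' hInv' (by omega)

lemma pvInvOuterAux (vs : List (List Int)) (n : Nat) :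
    ∀ (k i : Nat) (M : List (List Bool)), pvShape M n → pvInv vs n M i (i + 1) → n ≤ i + k →
      pvInv vs n ((PySem.List.pyRange ↑i ↑n).foldl
        (fun M ii => (PySem.List.pyRange (ii + 1) ↑n).foldl (fun M j => pvAdjStep vs M ii j) M) M) n (n + 1) := by
  intro k
  induction k with
  | zero =>
      intro i M hM hInv hk
      rw [pvPyRangeNil (by exact_mod_cast hk)]
      simp only [List.foldl_nil]
      intro p q
      rw [hInv p q]
      constructor
      · rintro ⟨h1, h2, h3, h4⟩
        exact ⟨h1, h2, by omega, h4⟩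
      · rintro ⟨h1, h2, h3, h4⟩
        exact ⟨h1, h2, by omega, h4⟩
  | succ m ih =>
      intro i M hM hInv hk
      by_cases hi : n ≤ i
      · rw [pvPyRangeNil (by exact_mod_cast hi)]
        simp only [List.foldl_nil]
        intro p q
        rw [hInv p q]
        constructor
        · rintro ⟨h1, h2, h3, h4⟩
          exact ⟨h1, h2, by omega, h4⟩
        · rintro ⟨h1, h2, h3, h4⟩
          exact ⟨h1, h2, by omega, h4⟩
      · rw [not_le] at hi
        rw [PySem.List.pyRange_one_cons (by exact_mod_cast hi)]
        simp only [List.foldl_cons]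
        have hcast : ((i : Int) + 1) = ((i + 1 : Nat) : Int) := by push_cast; ring
        rw [hcast]
        obtain ⟨hM', hInv'⟩ := pvInvInnerAux vs n i (n - (i+1)) (i + 1) M (by omega) hM hInv (by omega)
        refine ih (i + 1) _ hM' ?_ (by omega)
        intro p q
        rw [hInv' p q]
        constructor
        · rintro ⟨h1, h2, h3, h4⟩
          exact ⟨h1, h2, by omega, h4⟩
        · rintro ⟨h1, h2, h3, h4⟩
          exact ⟨h1, h2, by omega, h4⟩

lemma pvInvInit (vs : List (List Int)) (n : Nat) :
    pvShape (List.replicate n (List.replicate n false)) n ∧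
    pvInv vs n (List.replicate n (List.replicate n false)) 0 1 := by
  constructor
  · exact ⟨List.length_replicate, fun r hr => by rw [List.eq_of_mem_replicate hr]; exact List.length_replicate⟩
  · have hent0 : ∀ p q, pvEnt (List.replicate n (List.replicate n false)) p q = false := by
      intro p q
      unfold pvEnt
      simp only [pvGetD_eq]
      rw [List.getElem?_replicate]
      split_ifs
      · rw [Option.getD_some, List.getElem?_replicate]
        split_ifs <;> rfl
      · simp
    intro p q
    rw [hent0 p q]
    constructor
    · intro hfalse
      exact absurd hfalse (by simp)
    · rintro ⟨h1, h2, h3, h4⟩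
      omega

lemma pvAdjChar (vs : List (List Int)) (n : Nat) (a b : Nat) (hab : a < b) (hb : b < n) :
    pvAdjAt ((PySem.List.pyRange 0 ↑n).foldl
      (fun M i => (PySem.List.pyRange (i + 1) ↑n).foldl (fun M j => pvAdjStep vs M i j) M)
      (List.replicate n (List.replicate n false))) ↑a ↑b = pvRb vs a b := by
  obtain ⟨hM0, hInv0⟩ := pvInvInit vs n
  have hfin := pvInvOuterAux vs n n 0 _ hM0 hInv0 (by omega)
  simp only [Nat.cast_zero] at hfin
  unfold pvAdjAt
  rw [PySem.List.pyGetD_natCast, PySem.List.pyGetD_natCast]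
  have := hfin a b
  unfold pvEnt at this
  rcases hR : pvRb vs a b
  · rw [Bool.eq_false_iff]
    intro hcontr
    obtain ⟨h1, h2, h3, h4⟩ := this.mp hcontr
    rw [show min a b = a by omega, show max a b = b by omega] at h4
    rw [hR] at h4
    exact Bool.false_ne_true h4
  · exact this.mpr ⟨by omega, by omega, by omega, by
      rw [show min a b = a by omega, show max a b = b by omega]; exact hR⟩

lemma pvSumOnes (l : List Int) : (l.map (fun _ => (1 : Int))).sum = l.length := by
  induction l with
  | nil => simp
  | cons x t ih => rw [List.map_cons, List.sum_cons, ih]; simp; omega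

lemma pvFoldIf (l : List Int) (c : Int → Bool) (m : Nat) (a : List Int) :
    l.foldl (fun a j => if c j then pvIncAt a m else a) a
      = pvIncBy a m ((l.map (fun j => if c j then (1 : Int) else 0)).sum) := by
  rw [show (fun (a : List Int) (j : Int) => if c j then pvIncAt a m else a)
      = (fun acc j => pvIncBy acc m ((fun j => if c j then (1 : Int) else 0) j)) from
    funext fun a => funext fun j => by
      by_cases h : c j
      · simp only [h, if_pos]; rfl
      · simp only [h, if_neg, Bool.false_eq_true, not_false_iff, pvIncBy_zero]]
  exact pvFoldIncBy l _ m a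

lemma pvFoldNested (l : List Int) (f : Int → List Int) (c : Int → Int → Bool) (m : Nat) (a : List Int) :
    l.foldl (fun a i => (f i).foldl (fun a j => if c i j then pvIncAt a m else a) a) a
      = pvIncBy a m ((l.map (fun i => ((f i).map (fun j => if c i j then (1 : Int) else 0)).sum)).sum) := by
  rw [show (fun (a : List Int) (i : Int) => (f i).foldl (fun a j => if c i j then pvIncAt a m else a) a)
      = (fun acc i => pvIncBy acc m ((fun i => ((f i).map (fun j => if c i j then (1 : Int) else 0)).sum) i)) from
    funext fun a => funext fun i => pvFoldIf (f i) (c i) m a]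
  exact pvFoldIncBy l _ m a

lemma pvFoldTriple (l : List Int) (f : Int → List Int) (g : Int → Int → List Int)
    (adj : Int → Int → Bool) (d : Int → Int → Int → Bool) (a : List Int) :
    l.foldl (fun a i => (f i).foldl (fun a j =>
        if adj i j then a else (g i j).foldl (fun a k => if d i j k then pvIncAt a 3 else a) a) a) a
      = pvIncBy a 3 ((l.map (fun i => ((f i).map (fun j =>
          if adj i j then 0 else ((g i j).map (fun k => if d i j k then (1 : Int) else 0)).sum)).sum)).sum) := by
  have hmid : ∀ (a : List Int) (i : Int),
      (f i).foldl (fun a j =>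
        if adj i j then a else (g i j).foldl (fun a k => if d i j k then pvIncAt a 3 else a) a) a
      = pvIncBy a 3 (((f i).map (fun j =>
          if adj i j then 0 else ((g i j).map (fun k => if d i j k then (1 : Int) else 0)).sum)).sum) := by
    intro a i
    rw [show (fun (a : List Int) (j : Int) =>
          if adj i j then a else (g i j).foldl (fun a k => if d i j k then pvIncAt a 3 else a) a)
        = (fun acc j => pvIncBy acc 3 ((fun j =>
            if adj i j then 0 else ((g i j).map (fun k => if d i j k then (1 : Int) else 0)).sum) j)) from
      funext fun a => funext fun j => by
        by_cases h : adj i j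
        · simp only [h, if_pos, pvIncBy_zero]
        · simp only [h, Bool.false_eq_true, if_neg, not_false_iff]
          exact pvFoldIf (g i j) (d i j) 3 a]
    exact pvFoldIncBy (f i) _ 3 a
  rw [show (fun (a : List Int) (i : Int) => (f i).foldl (fun a j =>
        if adj i j then a else (g i j).foldl (fun a k => if d i j k then pvIncAt a 3 else a) a) a)
      = (fun acc i => pvIncBy acc 3 ((fun i => ((f i).map (fun j =>
          if adj i j then 0 else ((g i j).map (fun k => if d i j k then (1 : Int) else 0)).sum)).sum) i)) from
    funext fun a => funext fun i => hmid a i]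
  exact pvFoldIncBy l _ 3 a

lemma pvSumPyRange0 (b : Nat) (g : Int → Int) :
    ((PySem.List.pyRange 0 ↑b).map g).sum = ∑ k ∈ Finset.range b, g ↑k := by
  have := pvSumPyRange 0 b g
  simp only [Nat.cast_zero] at this
  rw [this, Finset.range_eq_Ico]

lemma pvPairCast (vs : List (List Int)) (n : Nat) :
    (↑(pvPairCnt vs n) : Int)
      = ∑ j ∈ Finset.range n, ∑ i ∈ Finset.range j, (if !(pvRb vs i j) then (1 : Int) else 0) := by
  have h1 : pvPairCnt vs n = ∑ j ∈ Finset.range n, (pvSjL vs j).length := by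
    unfold pvPairCnt; rw [pvSumRange]
  rw [h1, Nat.cast_sum]
  apply Finset.sum_congr rfl
  intro j _
  unfold pvSjL
  rw [← List.countP_eq_length_filter, pvCountPRange, Nat.cast_sum]
  apply Finset.sum_congr rfl
  intro i _
  split_ifs <;> simp

lemma pvCntCast (vs : List (List Int)) (k b : Nat) (hbk : b < k) :
    (↑((pvSjL vs k).countP (fun a => decide (a < b) && !(pvRb vs a b))) : Int)
      = ∑ i ∈ Finset.range b,
          (if !(pvRb vs i b) then (1 : Int) else 0) * (if !(pvRb vs i k) then 1 else 0) := by
  unfold pvSjL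
  rw [List.countP_filter]
  have hre : (List.range k).countP (fun a => (decide (a < b) && !(pvRb vs a b)) && !(pvRb vs a k))
      = (List.range b).countP (fun a => !(pvRb vs a b) && !(pvRb vs a k)) := by
    rw [← pvCountPRangeLt (fun a => !(pvRb vs a b) && !(pvRb vs a k)) (le_of_lt hbk)]
    apply List.countP_congr
    intro a _
    cases decide (a < b) <;> cases pvRb vs a b <;> cases pvRb vs a k <;> rfl
  rw [hre, pvCountPRange, Nat.cast_sum]
  apply Finset.sum_congr rfl
  intro i _
  rw [pvIteMul]
  split_ifs <;> simp_all

lemma pvTripCast (vs : List (List Int)) (n : Nat) :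
    (↑(pvTripCnt vs n) : Int)
      = ∑ k ∈ Finset.range n, ∑ j ∈ Finset.range k,
          (if !(pvRb vs j k) then (1 : Int) else 0) *
            ∑ i ∈ Finset.range j,
              (if !(pvRb vs i j) then (1 : Int) else 0) * (if !(pvRb vs i k) then 1 else 0) := by
  have h1 : pvTripCnt vs n = ∑ k ∈ Finset.range n, pvTripAt vs k := by
    unfold pvTripCnt; rw [pvSumRange]
  rw [h1, Nat.cast_sum]
  apply Finset.sum_congr rfl
  intro k _
  unfold pvTripAt
  rw [show pvSjL vs k = (List.range k).filter (fun i => !(pvRb vs i k)) from rfl,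
    pvSumMapFilter, pvSumRange, Nat.cast_sum]
  apply Finset.sum_congr rfl
  intro b hb
  have hbk : b < k := Finset.mem_range.mp hb
  by_cases hq : !(pvRb vs b k)
  · rw [if_pos hq, if_pos hq, one_mul]
    exact pvCntCast vs k b hbk
  · rw [if_neg hq, if_neg hq]
    simp

lemma pvP2cast (vs : List (List Int)) (N : Nat) (A2 : Int → Int → Bool)
    (hA : ∀ a b : Nat, a < b → b < N → A2 ↑a ↑b = pvRb vs a b) :
    ((PySem.List.pyRange 0 ↑N).map (fun i =>
        ((PySem.List.pyRange (i + 1) ↑N).map (fun j => if !(A2 i j) then (1 : Int) else 0)).sum)).sum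
      = ↑(pvPairCnt vs N) := by
  rw [pvSumPyRange0, pvPairCast]
  have hstep : ∀ i ∈ Finset.range N,
      ((PySem.List.pyRange (↑i + 1) ↑N).map (fun j => if !(A2 ↑i j) then (1 : Int) else 0)).sum
        = ∑ j ∈ Finset.Ico (i + 1) N, (if !(pvRb vs i j) then (1 : Int) else 0) := by
    intro i _
    rw [show ((i : Int) + 1) = ((i + 1 : Nat) : Int) from by push_cast; ring, pvSumPyRange]
    apply Finset.sum_congr rfl
    intro j hj
    have := Finset.mem_Ico.mp hj
    rw [hA i j (by omega) (by omega)]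
  rw [Finset.sum_congr rfl hstep, Finset.range_eq_Ico, Finset.sum_Ico_Ico_comm']

lemma pvT2cast (vs : List (List Int)) (N : Nat) (A2 : Int → Int → Bool)
    (hA : ∀ a b : Nat, a < b → b < N → A2 ↑a ↑b = pvRb vs a b) :
    ((PySem.List.pyRange 0 ↑N).map (fun i =>
        ((PySem.List.pyRange (i + 1) ↑N).map (fun j =>
          if A2 i j then 0 else
            ((PySem.List.pyRange (j + 1) ↑N).map (fun k =>
              if !(A2 i k) && !(A2 j k) then (1 : Int) else 0)).sum)).sum)).sum
      = ↑(pvTripCnt vs N) := by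
  set e : Nat → Nat → Int := fun a b => if !(pvRb vs a b) then (1 : Int) else 0 with he
  rw [pvSumPyRange0]
  have hstep : ∀ i ∈ Finset.range N,
      ((PySem.List.pyRange (↑i + 1) ↑N).map (fun j =>
          if A2 ↑i j then 0 else
            ((PySem.List.pyRange (j + 1) ↑N).map (fun k =>
              if !(A2 ↑i k) && !(A2 j k) then (1 : Int) else 0)).sum)).sum
        = ∑ k ∈ Finset.Ico (i + 1) N, ∑ j ∈ Finset.Ico (i + 1) k,
            e i j * (e i k * e j k) := by
    intro i hi
    rw [show ((i : Int) + 1) = ((i + 1 : Nat) : Int) from by push_cast; ring, pvSumPyRange]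
    have hj : ∀ j ∈ Finset.Ico (i + 1) N,
        (if A2 ↑i ↑j then 0 else
          ((PySem.List.pyRange (↑j + 1) ↑N).map (fun k =>
            if !(A2 ↑i k) && !(A2 ↑j k) then (1 : Int) else 0)).sum)
        = ∑ k ∈ Finset.Ico (j + 1) N, e i j * (e i k * e j k) := by
      intro j hjm
      have hjb := Finset.mem_Ico.mp hjm
      rw [show ((j : Int) + 1) = ((j + 1 : Nat) : Int) from by push_cast; ring, pvSumPyRange]
      have hk : ∀ k ∈ Finset.Ico (j + 1) N,
          (if !(A2 ↑i ↑k) && !(A2 ↑j ↑k) then (1 : Int) else 0) = e i k * e j k := by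
        intro k hkm
        have hkb := Finset.mem_Ico.mp hkm
        rw [hA i k (by omega) (by omega), hA j k (by omega) (by omega), he]
        simp only []
        rw [pvIteMul]
      rw [Finset.sum_congr rfl hk, hA i j (by omega) (by omega)]
      by_cases hij : pvRb vs i j
      · rw [if_pos hij]
        have hez : e i j = 0 := by rw [he]; simp [hij]
        apply Eq.symm
        apply Finset.sum_eq_zero
        intro k _
        rw [hez, zero_mul]
      · rw [if_neg hij]
        have heo : e i j = 1 := by rw [he]; simp [hij]
        apply Finset.sum_congr rfl
        intro k _
        rw [heo, one_mul]
    refine Eq.trans (Finset.sum_congr rfl hj) ?_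
    exact Finset.sum_Ico_Ico_comm' (i + 1) N _
  rw [Finset.sum_congr rfl hstep]
  calc ∑ i ∈ Finset.range N, ∑ k ∈ Finset.Ico (i + 1) N, ∑ j ∈ Finset.Ico (i + 1) k,
          e i j * (e i k * e j k)
      = ∑ k ∈ Finset.range N, ∑ i ∈ Finset.range k, ∑ j ∈ Finset.Ico (i + 1) k,
          e i j * (e i k * e j k) := by
        rw [Finset.range_eq_Ico, Finset.sum_Ico_Ico_comm']
    _ = ∑ k ∈ Finset.range N, ∑ j ∈ Finset.range k, ∑ i ∈ Finset.range j,
          e i j * (e i k * e j k) := by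
        apply Finset.sum_congr rfl
        intro k _
        rw [Finset.range_eq_Ico, Finset.sum_Ico_Ico_comm']
    _ = ↑(pvTripCnt vs N) := by
        rw [pvTripCast]
        apply Finset.sum_congr rfl
        intro k _
        apply Finset.sum_congr rfl
        intro j _
        rw [Finset.mul_sum]
        apply Finset.sum_congr rfl
        intro i _
        rw [he]
        simp only []
        ring

lemma pvLenPyRange (N : Nat) : (PySem.List.pyRange 0 ↑N).length = N := by
  rw [PySem.List.pyRange_zero_natCast, List.length_map, List.length_range]

lemma pvAssemble (N P T : Nat) (max_k : Int) (h : 0 ≤ max_k) :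
    (if max_k ≥ 3 then
        pvIncBy (pvIncBy (pvIncBy ((List.replicate (max_k + 1).toNat 0).set 0 1) 1 ↑N) 2 ↑P) 3 ↑T
      else pvIncBy (pvIncBy ((List.replicate (max_k + 1).toNat 0).set 0 1) 1 ↑N) 2 ↑P)
      = pvAns N P T max_k := by
  unfold pvAns
  rw [PySem.List.slice_to (xs := [1, (↑N : Int), ↑P, ↑T] ++ List.replicate (max_k - 3).toNat 0)
    (b := max_k + 1) (by omega)]
  by_cases h3 : (3 : Int) ≤ max_k
  · rw [if_pos (by omega)]
    have hm4 : (max_k + 1).toNat = 4 + (max_k - 3).toNat := by omega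
    have htk : (max_k + 1).toNat = 4 + (max_k - 3).toNat := hm4
    rw [hm4, List.replicate_add]
    have hrep4 : List.replicate 4 (0 : Int) = [0, 0, 0, 0] := rfl
    rw [hrep4]
    simp only [List.cons_append, List.nil_append]
    simp only [pvIncBy, List.set_cons_zero, List.set_cons_succ, List.getD_cons_succ,
      List.getD_cons_zero, zero_add]
    exact (List.take_of_length_le (by simp; omega)).symm
  · rw [if_neg (by omega)]
    interval_cases max_k
    · -- max_k = 0
      simp only [show ((0:Int)+1).toNat = 1 from rfl, List.replicate_succ, List.replicate_zero]
      simp only [List.set_cons_zero]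
      simp [pvIncBy]
    · -- max_k = 1
      simp only [show ((1:Int)+1).toNat = 2 from rfl, List.replicate_succ, List.replicate_zero]
      simp only [List.set_cons_zero]
      simp only [pvIncBy, List.set_cons_succ, List.set_cons_zero, List.getD_cons_succ,
        List.getD_cons_zero, zero_add]
      simp
    · -- max_k = 2
      simp only [show ((2:Int)+1).toNat = 3 from rfl, List.replicate_succ, List.replicate_zero]
      simp only [List.set_cons_zero]
      simp only [pvIncBy, List.set_cons_succ, List.set_cons_zero, List.getD_cons_succ,
        List.getD_cons_zero, zero_add]
      rfl

lemma pvA_eq (cycles : List (List Int × List Int)) (max_k : Int) (h : 0 ≤ max_k) :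
    compute_alphas cycles max_k
      = pvAns cycles.length (pvPairCnt (cycles.map (fun c => c.2)) cycles.length)
          (pvTripCnt (cycles.map (fun c => c.2)) cycles.length) max_k := by
  unfold compute_alphas
  dsimp only
  have hAdj := pvAdjChar (cycles.map (fun c => c.2)) cycles.length
  rw [show (fun (a : List Int) (_ : Int) => pvIncAt a 1)
      = (fun (acc : List Int) (x : Int) => pvIncBy acc 1 ((fun _ => (1 : Int)) x)) from rfl]
  rw [pvFoldIncBy]
  rw [pvSumOnes, pvLenPyRange]
  rw [pvFoldNested]
  rw [pvFoldTriple]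
  rw [pvP2cast (cycles.map (fun c => c.2)) cycles.length _ hAdj]
  rw [pvT2cast (cycles.map (fun c => c.2)) cycles.length _ hAdj]
  exact pvAssemble cycles.length _ _ max_k h

-- ===== VERDICT (by name: the statement is the Claim_ definition above) =====

theorem compute_alphas_spec : Claim_equal_compute_alphas := by
  intro cycles max_k _ hpre
  unfold Spec_compute_alphas
  have h0 : 0 ≤ max_k := by
    rcases hpre with h | ⟨h, _⟩ | ⟨h, _⟩ <;> omega
  rw [pvA_eq cycles max_k h0, pvB_eq cycles max_k]
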